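-- pv_equiv track=rewrite | github.com/sainihimanshu1999/Data-Structures | June2021/BackTrack/MatchstickSqaure.py | matchStick
-- ===== SOURCE A (Python) =====
-- def matchStick(nums):
--     if not nums:
--         return False
--
--     n = len(nums)
--     perimeter = sum(nums)
--
--     side = perimeter//4
--
--     if side*4!=perimeter:
--         return False
--
--     nums.sort(reverse = True)
--     result = [0 for _ in range(4)]
--
--     def dfs(index):
--         if index == n:
--             return result[0]==result[1]==result[2]==side
--
--         for i in range(4):
--             if result[i]+nums[index]<=side:
--                 result[i]+=nums[index]
--                 if dfs(index+1):
--                     return True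
--                 result[i]-=nums[index]
--         return False
--
--     return dfs(0)
-- ===== SOURCE B (Python) =====
-- def matchStick(nums):
--     # Iterative frontier (set-of-states BFS) instead of recursive backtracking;
--     # deduplicating equal load-tuples collapses the repeated work of A's DFS.
--     if not nums:
--         return False
--     total = sum(nums)
--     side, rem = divmod(total, 4)
--     if rem != 0:
--         return False
--     sticks = sorted(nums, reverse=True)
--     states = {(0, 0, 0, 0)}
--     for x in sticks:
--         nxt = set()
--         for (a, b, c, d) in states:
--             if a + x <= side:
--                 nxt.add((a + x, b, c, d))
--             if b + x <= side:
--                 nxt.add((a, b + x, c, d))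
--             if c + x <= side:
--                 nxt.add((a, b, c + x, d))
--             if d + x <= side:
--                 nxt.add((a, b, c, d + x))
--         states = nxt
--     return any(a == b and b == c and c == side for (a, b, c, d) in states)
-- ===== Notes on version B (the rewrite author's own statement) =====
-- stated objective: alternative
-- what changed: Replaces A's recursive 4-way backtracking DFS with an iterative breadth-first sweep that maintains a deduplicated set of reachable side-load tuples (a frontier DP over states instead of a search over paths); B also leaves its argument unmutated, while A sorts it in place.
import Mathlib
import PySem

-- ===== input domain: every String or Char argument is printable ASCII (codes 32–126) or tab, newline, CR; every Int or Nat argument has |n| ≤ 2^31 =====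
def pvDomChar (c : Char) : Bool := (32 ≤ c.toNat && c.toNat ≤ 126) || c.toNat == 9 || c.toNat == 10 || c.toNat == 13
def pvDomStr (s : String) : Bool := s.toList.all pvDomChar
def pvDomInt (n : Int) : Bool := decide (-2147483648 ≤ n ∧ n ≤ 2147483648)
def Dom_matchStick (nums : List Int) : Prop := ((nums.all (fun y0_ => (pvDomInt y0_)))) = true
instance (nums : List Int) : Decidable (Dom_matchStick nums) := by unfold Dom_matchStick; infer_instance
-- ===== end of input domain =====

-- B replaces A's recursive 4-way backtracking by an iterative frontier of deduplicated
-- load-tuples (set-of-states sweep); equivalence is about the RETURN value only — A sorts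
-- its argument in place, B does not mutate it.

-- ===== PORT A =====
-- A's dfs: recursion over the remaining (sorted) sticks; the `for i in range(4)` with
-- early `return True` and undo is the `any` over the four indices; result is the 4-list.
def dfsA (side : Int) : List Int → List Int → Bool
  | [], r => decide (r.getD 0 0 = r.getD 1 0) && decide (r.getD 1 0 = r.getD 2 0)
             && decide (r.getD 2 0 = side)
  | x :: rest, r =>
      ([0, 1, 2, 3] : List Nat).any (fun i =>
        if r.getD i 0 + x ≤ side then dfsA side rest (r.set i (r.getD i 0 + x)) else false)

def matchStick (nums : List Int) : Bool :=
  if nums = [] then false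
  else
    let perimeter := nums.sum
    let side := PySem.Int.floordiv perimeter 4
    if side * 4 ≠ perimeter then false
    else
      let sorted := PySem.List.sorted nums (fun v => v) (reverse := true)
      dfsA side sorted [0, 0, 0, 0]

-- ===== PORT B =====
-- One step of B's frontier: successors of one state added into the accumulator set.
def stepOne (side x : Int) (nxt : PySem.Set (Int × Int × Int × Int))
    (s : Int × Int × Int × Int) : PySem.Set (Int × Int × Int × Int) :=
  match s with
  | (a, b, c, d) =>
    let n1 := if a + x ≤ side then PySem.Set.add nxt (a + x, b, c, d) else nxt
    let n2 := if b + x ≤ side then PySem.Set.add n1 (a, b + x, c, d) else n1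
    let n3 := if c + x ≤ side then PySem.Set.add n2 (a, b, c + x, d) else n2
    if d + x ≤ side then PySem.Set.add n3 (a, b, c, d + x) else n3

def stepB (side x : Int) (states : PySem.Set (Int × Int × Int × Int)) :
    PySem.Set (Int × Int × Int × Int) :=
  states.foldl (stepOne side x) PySem.Set.empty

-- divmod(total, 4): the divisor is the constant 4 ≠ 0, so divmod is ported exactly
-- as Python floor-division and floor-mod (PySem.Int.floordiv / PySem.Int.mod).
def matchStick_alt (nums : List Int) : Bool :=
  if nums = [] then false
  else
    let total := nums.sum
    let side := PySem.Int.floordiv total 4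
    let rem := PySem.Int.mod total 4
    if rem ≠ 0 then false
    else
      let sticks := PySem.List.sorted nums (fun v => v) (reverse := true)
      let final := sticks.foldl (fun st x => stepB side x st)
                     (PySem.Set.add PySem.Set.empty ((0 : Int), (0 : Int), (0 : Int), (0 : Int)))
      final.any (fun s => match s with
        | (a, b, c, _) => decide (a = b) && decide (b = c) && decide (c = side))

-- ===== PRECONDITION & SPEC =====
def Spec_matchStick (nums : List Int) (out : Bool) : Prop := out = matchStick_alt nums
instance (nums : List Int) (out : Bool) : Decidable (Spec_matchStick nums out) := by unfold Spec_matchStick; infer_instance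

-- ===== CLAIM (what is proved, stated in full; the proofs are below) =====
def Claim_equal_matchStick : Prop := ∀ (nums : List Int), Dom_matchStick nums → Spec_matchStick nums (matchStick nums)

-- ===== LEMMAS AND PROOFS =====

-- dfsA on a length-4 list expressed on the tuple of its entries.
theorem dfsA_tuple (side : Int) (sticks : List Int) (a b c d : Int) :
    dfsA side sticks [a, b, c, d] =
      (match sticks with
       | [] => decide (a = b) && decide (b = c) && decide (c = side)
       | x :: rest =>
         (if a + x ≤ side then dfsA side rest [a + x, b, c, d] else false) ||
         (if b + x ≤ side then dfsA side rest [a, b + x, c, d] else false) ||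
         (if c + x ≤ side then dfsA side rest [a, b, c + x, d] else false) ||
         (if d + x ≤ side then dfsA side rest [a, b, c, d + x] else false)) := by
  cases sticks with
  | nil => simp [dfsA]
  | cons x rest => simp [dfsA, List.any, List.set, Bool.or_assoc]

-- check predicate used by B's final `any`
def chk (side : Int) (s : Int × Int × Int × Int) : Bool :=
  match s with
  | (a, b, c, _) => decide (a = b) && decide (b = c) && decide (c = side)

-- dfsA restated on tuples
def dfsT (side : Int) : List Int → (Int × Int × Int × Int) → Bool
  | [], s => chk side s
  | x :: rest, (a, b, c, d) =>
      (if a + x ≤ side then dfsT side rest (a + x, b, c, d) else false) ||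
      (if b + x ≤ side then dfsT side rest (a, b + x, c, d) else false) ||
      (if c + x ≤ side then dfsT side rest (a, b, c + x, d) else false) ||
      (if d + x ≤ side then dfsT side rest (a, b, c, d + x) else false)

theorem dfsA_eq_dfsT (side : Int) (sticks : List Int) (a b c d : Int) :
    dfsA side sticks [a, b, c, d] = dfsT side sticks (a, b, c, d) := by
  induction sticks generalizing a b c d with
  | nil => rw [dfsA_tuple]; rfl
  | cons x rest ih => rw [dfsA_tuple]; simp [dfsT, ih]

-- membership in Set.add
theorem any_set_add {α : Type} [BEq α] [LawfulBEq α] (S : PySem.Set α) (t : α) (P : α → Bool) :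
    (PySem.Set.add S t).any P = (S.any P || P t) := by
  by_cases h : t ∈ S
  · simp [PySem.Set.add, PySem.Set.contains, h]
    intro hP; exact ⟨t, h, hP⟩
  · simp [PySem.Set.add, PySem.Set.contains, h, List.any_append]

-- successors of one state, folded into an accumulator: `any` splits off
theorem any_stepOne (side x : Int) (N : PySem.Set (Int × Int × Int × Int))
    (s : Int × Int × Int × Int) (P : (Int × Int × Int × Int) → Bool) :
    (stepOne side x N s).any P =
      (N.any P ||
        ((if s.1 + x ≤ side then P (s.1 + x, s.2.1, s.2.2.1, s.2.2.2) else false) ||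
         (if s.2.1 + x ≤ side then P (s.1, s.2.1 + x, s.2.2.1, s.2.2.2) else false) ||
         (if s.2.2.1 + x ≤ side then P (s.1, s.2.1, s.2.2.1 + x, s.2.2.2) else false) ||
         (if s.2.2.2 + x ≤ side then P (s.1, s.2.1, s.2.2.1, s.2.2.2 + x) else false))) := by
  obtain ⟨a, b, c, d⟩ := s
  simp only [stepOne]
  split_ifs <;> simp [any_set_add, Bool.or_assoc]

-- the frontier step: `any` over the new frontier = any state has a successor satisfying P
theorem any_stepB_aux (side x : Int) (S N : PySem.Set (Int × Int × Int × Int))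
    (P : (Int × Int × Int × Int) → Bool) :
    (S.foldl (stepOne side x) N).any P =
      (N.any P || S.any (fun s =>
        (if s.1 + x ≤ side then P (s.1 + x, s.2.1, s.2.2.1, s.2.2.2) else false) ||
        (if s.2.1 + x ≤ side then P (s.1, s.2.1 + x, s.2.2.1, s.2.2.2) else false) ||
        (if s.2.2.1 + x ≤ side then P (s.1, s.2.1, s.2.2.1 + x, s.2.2.2) else false) ||
        (if s.2.2.2 + x ≤ side then P (s.1, s.2.1, s.2.2.1, s.2.2.2 + x) else false))) := by
  induction S generalizing N with
  | nil => simp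
  | cons s S ih => simp [List.foldl_cons, ih, any_stepOne, Bool.or_assoc]

-- main bridge: any chk over the iterated frontier = any dfsT over the starting states
theorem frontier_eq_dfsT (side : Int) (sticks : List Int)
    (S : PySem.Set (Int × Int × Int × Int)) :
    (sticks.foldl (fun st x => stepB side x st) S).any (chk side) =
      S.any (dfsT side sticks) := by
  induction sticks generalizing S with
  | nil => rfl
  | cons x rest ih =>
      simp only [List.foldl_cons]
      rw [ih]
      simp only [stepB, any_stepB_aux, PySem.Set.empty, List.any_nil, Bool.false_or]
      congr 1

-- ===== VERDICT (by name: the statement is the Claim_ definition above) =====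
theorem matchStick_spec : Claim_equal_matchStick := by
  intro nums _
  unfold Spec_matchStick matchStick matchStick_alt
  have hmod := PySem.Int.floordiv_mul_add_mod nums.sum 4
  by_cases hnil : nums = []
  · simp [hnil]
  · simp only [hnil, if_false]
    by_cases hdiv : PySem.Int.floordiv nums.sum 4 * 4 = nums.sum
    · rw [if_neg (by omega), if_neg (by omega)]
      have hchk : (fun s : Int × Int × Int × Int => match s with
          | (a, b, c, _) => decide (a = b) && decide (b = c) &&
              decide (c = PySem.Int.floordiv nums.sum 4)) = chk (PySem.Int.floordiv nums.sum 4) := rfl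
      rw [hchk, frontier_eq_dfsT]
      simp [PySem.Set.add, PySem.Set.empty, PySem.Set.contains, dfsA_eq_dfsT]
    · rw [if_pos (by omega), if_pos (by omega)]
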